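-- pv_equiv track=rewrite | github.com/Jennifer-Vo/Elevation-Map-Analysis | elevation.py | compare_elevations_within_row
-- ===== SOURCE A (Python) =====
-- from typing import List
--
-- def compare_elevations_within_row(elevation_map: List[List[int]], map_row: int,
--                                   level: int) -> List[int]:
--     """Return a new list containing the three counts: the number of
--     elevations from row number map_row of elevation map elevation_map
--     that are less than, equal to, and greater than elevation level.
--
--     Precondition: elevation_map is a valid elevation map.
--                   0 <= map_row < len(elevation_map).
--
--     >>> compare_elevations_within_row(THREE_BY_THREE, 1, 5)
--     [1, 1, 1]
--     >>> compare_elevations_within_row(FOUR_BY_FOUR, 1, 2)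
--     [0, 1, 3]
--
--     """
--     elevation_result = [0, 0, 0]
--     for number in elevation_map[map_row]:
--         if number < level:
--             elevation_result[0] = elevation_result[0] + 1
--         if number == level:
--             elevation_result[1] = elevation_result[1]+ 1
--         if number > level:
--             elevation_result[2] = elevation_result[2] + 1
--     return elevation_result
-- ===== SOURCE B (Python) =====
-- from typing import List
--
-- def compare_elevations_within_row(elevation_map: List[List[int]], map_row: int,
--                                   level: int) -> List[int]:
--     # Sort the row, then binary-search the boundaries of the block equal to
--     # level: left = bisect_left(row, level), right = bisect_right(row, level).
--     row = sorted(elevation_map[map_row])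
--     lo, hi = 0, len(row)
--     while lo < hi:
--         mid = (lo + hi) // 2
--         if row[mid] < level:
--             lo = mid + 1
--         else:
--             hi = mid
--     left = lo
--     lo, hi = 0, len(row)
--     while lo < hi:
--         mid = (lo + hi) // 2
--         if level < row[mid]:
--             hi = mid
--         else:
--             lo = mid + 1
--     right = lo
--     return [left, right - left, len(row) - right]
-- ===== Notes on version B (the rewrite author's own statement) =====
-- stated objective: alternative
-- what changed: B sorts the row and binary-searches the two boundaries of the block of elements equal to level (bisect_left/bisect_right), reading all three counts off the two indices, instead of A's single pass that compares every element against level three times.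
import Mathlib
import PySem

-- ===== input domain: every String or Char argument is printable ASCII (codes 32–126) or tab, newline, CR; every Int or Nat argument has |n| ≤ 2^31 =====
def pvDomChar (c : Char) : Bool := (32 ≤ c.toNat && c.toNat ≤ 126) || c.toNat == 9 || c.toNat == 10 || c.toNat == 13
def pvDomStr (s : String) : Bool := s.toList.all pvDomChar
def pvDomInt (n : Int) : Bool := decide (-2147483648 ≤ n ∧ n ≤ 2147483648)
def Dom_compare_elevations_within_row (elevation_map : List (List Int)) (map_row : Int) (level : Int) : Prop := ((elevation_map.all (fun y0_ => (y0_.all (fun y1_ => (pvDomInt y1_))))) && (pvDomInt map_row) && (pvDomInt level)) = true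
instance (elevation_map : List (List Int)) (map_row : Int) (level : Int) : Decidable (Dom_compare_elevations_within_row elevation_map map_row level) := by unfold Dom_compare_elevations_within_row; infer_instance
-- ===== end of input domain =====

-- B sorts the row and binary-searches the left/right boundaries of the level block (a different algorithm; return value only).


-- ===== PORT A =====
-- Loop over elevation_map[map_row] updating the three counters of elevation_result
-- (the [l, e, g] list is carried as a triple; the three independent ifs stay in order).
def compare_elevations_within_row (elevation_map : List (List Int)) (map_row : Int) (level : Int) : List Int :=
  let row := PySem.List.pyGetD elevation_map map_row []
  let r := row.foldl (fun (acc : Int × Int × Int) number =>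
    let acc := if number < level then (acc.1 + 1, acc.2.1, acc.2.2) else acc
    let acc := if number = level then (acc.1, acc.2.1 + 1, acc.2.2) else acc
    let acc := if number > level then (acc.1, acc.2.1, acc.2.2 + 1) else acc
    acc) (0, 0, 0)
  [r.1, r.2.1, r.2.2]

-- ===== PORT B =====
-- sorted(elevation_map[map_row]); the two hand-written while-loops in Source B are exactly
-- the standard bisect_left / bisect_right loops, which PySem.List.bisectLeft / bisectRight transcribe.
def compare_elevations_within_row_alt (elevation_map : List (List Int)) (map_row : Int) (level : Int) : List Int :=
  let row := PySem.List.sorted (PySem.List.pyGetD elevation_map map_row []) (fun x => x) false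
  let left := PySem.List.bisectLeft row level
  let right := PySem.List.bisectRight row level
  [(left : Int), (right : Int) - (left : Int), (row.length : Int) - (right : Int)]

-- ===== PRECONDITION & SPEC =====
-- Pre_ excludes exactly the inputs where Python A raises IndexError on elevation_map[map_row].
def Pre_compare_elevations_within_row (elevation_map : List (List Int)) (map_row : Int) (level : Int) : Prop :=
  PySem.Raise.InRange elevation_map.length map_row
instance (elevation_map : List (List Int)) (map_row : Int) (level : Int) : Decidable (Pre_compare_elevations_within_row elevation_map map_row level) := by unfold Pre_compare_elevations_within_row; infer_instance
def pvWitness_compare_elevations_within_row : List (List Int) × Int × Int := ([[1, 5, 9]], 0, 5)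
def Spec_compare_elevations_within_row (elevation_map : List (List Int)) (map_row : Int) (level : Int) (out : List Int) : Prop := out = compare_elevations_within_row_alt elevation_map map_row level
instance (elevation_map : List (List Int)) (map_row : Int) (level : Int) (out : List Int) : Decidable (Spec_compare_elevations_within_row elevation_map map_row level out) := by unfold Spec_compare_elevations_within_row; infer_instance

-- ===== CLAIM (what is proved, stated in full; the proofs are below) =====
def Claim_equal_compare_elevations_within_row : Prop := ∀ (elevation_map : List (List Int)) (map_row : Int) (level : Int), Dom_compare_elevations_within_row elevation_map map_row level → Pre_compare_elevations_within_row elevation_map map_row level → Spec_compare_elevations_within_row elevation_map map_row level (compare_elevations_within_row elevation_map map_row level)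

-- ===== LEMMAS AND PROOFS =====
-- Invariant of A's loop: the fold shifts the counters by the three countPs of the row.
theorem foldl_counts (level : Int) (row : List Int) (a b c : Int) :
    row.foldl (fun (acc : Int × Int × Int) number =>
      let acc := if number < level then (acc.1 + 1, acc.2.1, acc.2.2) else acc
      let acc := if number = level then (acc.1, acc.2.1 + 1, acc.2.2) else acc
      let acc := if number > level then (acc.1, acc.2.1, acc.2.2 + 1) else acc
      acc) (a, b, c)
    = (a + row.countP (fun x => x < level), b + row.countP (fun x => x = level),
       c + row.countP (fun x => level < x)) := by
  induction row generalizing a b c with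
  | nil => simp
  | cons h t ih =>
    simp only [List.foldl_cons, List.countP_cons]
    rw [ih]
    rcases lt_trichotomy h level with hlt | heq | hgt
    · simp [hlt, not_lt.mpr (le_of_lt hlt), ne_of_lt hlt]; ring_nf
    · subst heq; simp; ring_nf
    · simp [hgt, not_lt.mpr (le_of_lt hgt), (ne_of_gt hgt)]; ring_nf

theorem countP_trichotomy (level : Int) (row : List Int) :
    row.countP (fun x => x < level) + row.countP (fun x => x = level)
      + row.countP (fun x => level < x) = row.length := by
  induction row with
  | nil => simp
  | cons h t ih =>
    simp only [List.countP_cons, List.length_cons]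
    rcases lt_trichotomy h level with hlt | heq | hgt
    · simp [hlt, not_lt.mpr (le_of_lt hlt), ne_of_lt hlt]; omega
    · subst heq; simp; omega
    · simp [hgt, not_lt.mpr (le_of_lt hgt), ne_of_gt hgt]; omega

-- A countP equals k when exactly the first k positions satisfy p.
theorem countP_eq_of_split (p : Int → Bool) (s : List Int) (k : Nat) (hk : k ≤ s.length)
    (h1 : ∀ j (hj : j < s.length), j < k → p s[j])
    (h2 : ∀ j (hj : j < s.length), k ≤ j → p s[j] = false) :
    s.countP p = k := by
  induction s generalizing k with
  | nil => simp only [List.length_nil, Nat.le_zero] at hk; simp [hk]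
  | cons h t ih =>
    cases k with
    | zero =>
      rw [List.countP_eq_zero]
      intro x hx
      obtain ⟨j, hj, rfl⟩ := List.mem_iff_getElem.mp hx
      simpa using h2 j hj (Nat.zero_le j)
    | succ k =>
      have hh : p h := by simpa using h1 0 (by simp) (Nat.succ_pos k)
      rw [List.countP_cons, if_pos hh]
      have := ih k (by simpa using hk)
        (fun j hj hjk => by simpa using h1 (j+1) (by simpa) (by omega))
        (fun j hj hjk => by simpa using h2 (j+1) (by simpa) (by omega))
      omega

theorem count_lt_eq_bisectLeft (level : Int) (s : List Int)
    (hp : List.Pairwise (fun a b => a ≤ b) s) :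
    s.countP (fun x => x < level) = PySem.List.bisectLeft s level := by
  obtain ⟨hlen, hA, hB⟩ := PySem.List.bisectLeft_spec s level hp
  exact countP_eq_of_split _ s _ hlen
    (fun j hj hjk => by simpa using hA j hj hjk)
    (fun j hj hjk => by simpa using not_lt.mpr (hB j hj hjk))

theorem count_le_eq_bisectRight (level : Int) (s : List Int)
    (hp : List.Pairwise (fun a b => a ≤ b) s) :
    s.countP (fun x => x ≤ level) = PySem.List.bisectRight s level := by
  obtain ⟨hlen, hA, hB⟩ := PySem.List.bisectRight_spec s level hp
  exact countP_eq_of_split _ s _ hlen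
    (fun j hj hjk => by simpa using hA j hj hjk)
    (fun j hj hjk => by simpa using not_le.mpr (hB j hj hjk))

theorem countP_le_split (level : Int) (s : List Int) :
    s.countP (fun x => x ≤ level)
      = s.countP (fun x => x < level) + s.countP (fun x => x = level) := by
  induction s with
  | nil => simp
  | cons h t ih =>
    simp only [List.countP_cons]
    rcases lt_trichotomy h level with hlt | heq | hgt
    · simp [hlt, le_of_lt hlt, ne_of_lt hlt]; omega
    · subst heq; simp; omega
    · simp [not_le.mpr hgt, not_lt.mpr (le_of_lt hgt), ne_of_gt hgt]; omega

-- ===== VERDICT (by name: the statement is the Claim_ definition above) =====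
theorem compare_elevations_within_row_spec : Claim_equal_compare_elevations_within_row := by
  intro elevation_map map_row level _ _
  unfold Spec_compare_elevations_within_row compare_elevations_within_row compare_elevations_within_row_alt
  simp only [foldl_counts, zero_add]
  set row := PySem.List.pyGetD elevation_map map_row [] with hrow
  set s := PySem.List.sorted row (fun x => x) false with hs
  have hperm : s.Perm row := PySem.List.sorted_perm row (fun x => x) false
  have hpair : List.Pairwise (fun a b => a ≤ b) s := PySem.List.sorted_pairwise row (fun x => x)
  have hlt : row.countP (fun x => x < level) = PySem.List.bisectLeft s level := by
    rw [← hperm.countP_eq]; exact count_lt_eq_bisectLeft level s hpair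
  have hle : row.countP (fun x => x ≤ level) = PySem.List.bisectRight s level := by
    rw [← hperm.countP_eq]; exact count_le_eq_bisectRight level s hpair
  have hsplit := countP_le_split level row
  have htri := countP_trichotomy level row
  have hlen : s.length = row.length := hperm.length_eq
  simp only [List.cons.injEq, and_true]
  refine ⟨by rw [← hlt], ?_, ?_⟩ <;> omega
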